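-- pv_equiv track=rewrite | github.com/lvzii/nlpertools | src/nlpertools/dataprocess/dedupl.py | deduplicate_dict_list
-- ===== SOURCE A (Python) =====
-- def deduplicate_dict_list(dict_list: list, key: str) -> list:
--     seen = set()
--     result = []
--     for d in dict_list:
--         if key in d and d[key] not in seen:
--             seen.add(d[key])
--             result.append(d)
--     return result
-- ===== SOURCE B (Python) =====
-- def deduplicate_dict_list(dict_list: list, key: str) -> list:
--     kept = [d for d in dict_list if key in d]
--     return [d for i, d in enumerate(kept)
--             if all(e[key] != d[key] for e in kept[:i])]
-- ===== Notes on version B (the rewrite author's own statement) =====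
-- stated objective: alternative
-- what changed: Replaces the stateful single pass with a seen-set by a stateless two-stage comprehension: filter the dicts containing the key, then keep each one iff a brute-force scan of the preceding filtered prefix finds no equal key value.
import Mathlib
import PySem

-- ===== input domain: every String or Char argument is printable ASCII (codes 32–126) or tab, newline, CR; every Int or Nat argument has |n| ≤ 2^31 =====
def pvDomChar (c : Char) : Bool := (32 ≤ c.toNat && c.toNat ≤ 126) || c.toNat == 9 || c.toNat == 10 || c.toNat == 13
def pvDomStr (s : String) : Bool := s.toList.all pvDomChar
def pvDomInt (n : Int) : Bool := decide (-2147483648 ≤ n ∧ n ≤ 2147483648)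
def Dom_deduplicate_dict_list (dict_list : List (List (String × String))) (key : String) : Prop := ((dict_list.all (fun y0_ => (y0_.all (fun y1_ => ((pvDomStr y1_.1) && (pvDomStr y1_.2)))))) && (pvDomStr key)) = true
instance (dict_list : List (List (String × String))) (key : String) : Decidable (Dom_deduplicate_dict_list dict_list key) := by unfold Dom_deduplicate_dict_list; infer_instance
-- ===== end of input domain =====

-- B drops A's seen-set state: it filters to dicts containing the key, then keeps each one iff a
-- brute-force scan of its filtered prefix finds no equal key value (alternative, O(n^2) vs A's O(n)).

-- ===== PORT A =====
-- A: seen = set(); result = []; for d: if key in d and d[key] not in seen: seen.add; result.append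
def deduplicate_dict_list (dict_list : List (List (String × String))) (key : String) : List (List (String × String)) :=
  (dict_list.foldl
    (fun (st : PySem.Set String × List (List (String × String))) d =>
      match (PySem.Dict.mk d).get? key with
      | none => st
      | some v =>
        if PySem.Set.contains st.1 v then st
        else (PySem.Set.add st.1 v, st.2 ++ [d]))
    (PySem.Set.empty, [])).2

-- ===== PORT B =====
-- B: kept = [d for d in dict_list if key in d];
--    [d for i, d in enumerate(kept) if all(e[key] != d[key] for e in kept[:i])]
-- (e[key]/d[key] are exact here as Option comparisons: every member of kept contains key, so get? is some)
def deduplicate_dict_list_alt (dict_list : List (List (String × String))) (key : String) : List (List (String × String)) :=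
  let kept := dict_list.filter (fun d => (PySem.Dict.mk d).contains key)
  ((PySem.List.enumerate kept).filter
      (fun p => (PySem.List.slice kept none (some p.1)).all
        (fun e => (PySem.Dict.mk e).get? key != (PySem.Dict.mk p.2).get? key))).map (·.2)

-- ===== PRECONDITION & SPEC =====
def Spec_deduplicate_dict_list (dict_list : List (List (String × String))) (key : String) (out : List (List (String × String))) : Prop := out = deduplicate_dict_list_alt dict_list key
instance (dict_list : List (List (String × String))) (key : String) (out : List (List (String × String))) : Decidable (Spec_deduplicate_dict_list dict_list key out) := by unfold Spec_deduplicate_dict_list; infer_instance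

-- ===== CLAIM (what is proved, stated in full; the proofs are below) =====
def Claim_equal_deduplicate_dict_list : Prop := ∀ (dict_list : List (List (String × String))) (key : String), Dom_deduplicate_dict_list dict_list key → Spec_deduplicate_dict_list dict_list key (deduplicate_dict_list dict_list key)

-- ===== LEMMAS AND PROOFS =====

-- B's comprehension generalized to an arbitrary already-processed prefix `pre` of the filtered list.
def pvBexp (key : String) (pre k : List (List (String × String))) : List (List (String × String)) :=
  ((PySem.List.enumerate k (pre.length : Int)).filter
      (fun p => (PySem.List.slice (pre ++ k) none (some p.1)).all
        (fun e => (PySem.Dict.mk e).get? key != (PySem.Dict.mk p.2).get? key))).map (·.2)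

theorem pvBexp_nil (key : String) (pre : List (List (String × String))) : pvBexp key pre [] = [] := by
  simp [pvBexp, PySem.List.enumerate]

theorem pvBexp_cons (key : String) (pre : List (List (String × String))) (d : List (String × String))
    (t : List (List (String × String))) :
    pvBexp key pre (d :: t) =
      (if pre.all (fun e => (PySem.Dict.mk e).get? key != (PySem.Dict.mk d).get? key)
        then [d] else []) ++ pvBexp key (pre ++ [d]) t := by
  unfold pvBexp
  rw [PySem.List.enumerate_cons]
  simp only [List.filter_cons]
  have h0 : PySem.List.slice (pre ++ d :: t) none (some (pre.length : Int)) = pre := by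
    rw [PySem.List.slice_to_natCast]
    exact List.take_left
  have h1 : PySem.List.enumerate t ((pre.length : Int) + 1)
      = PySem.List.enumerate t (((pre ++ [d]).length : Int)) := by
    simp
  have h2 : ∀ p ∈ PySem.List.enumerate t (((pre ++ [d]).length : Int)),
      ((PySem.List.slice (pre ++ d :: t) none (some p.1)).all
        (fun e => (PySem.Dict.mk e).get? key != (PySem.Dict.mk p.2).get? key))
      = ((PySem.List.slice ((pre ++ [d]) ++ t) none (some p.1)).all
        (fun e => (PySem.Dict.mk e).get? key != (PySem.Dict.mk p.2).get? key)) := by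
    intro p _; simp
  rw [h0, h1, List.filter_congr h2]
  by_cases hc : pre.all (fun e => (PySem.Dict.mk e).get? key != (PySem.Dict.mk d).get? key) = true
  · rw [if_pos hc, if_pos hc, List.map_cons, List.singleton_append]
  · rw [if_neg hc, if_neg hc, List.nil_append]

-- Loop invariant: A's fold over the remaining list, with `seen` holding exactly the key values of
-- the processed filtered prefix `pre`, appends exactly B's prefix-scan result on the remaining
-- filtered elements.
theorem dedup_main (key : String) (l : List (List (String × String)))
    (pre : List (List (String × String))) (seen : PySem.Set String)
    (res : List (List (String × String)))
    (hseen : ∀ v : String, PySem.Set.contains seen v = true ↔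
      ∃ e ∈ pre, (PySem.Dict.mk e).get? key = some v) :
    (l.foldl
      (fun (st : PySem.Set String × List (List (String × String))) d =>
        match (PySem.Dict.mk d).get? key with
        | none => st
        | some v =>
          if PySem.Set.contains st.1 v then st
          else (PySem.Set.add st.1 v, st.2 ++ [d])) (seen, res)).2
    = res ++ pvBexp key pre (l.filter (fun d => (PySem.Dict.mk d).contains key)) := by
  induction l generalizing pre seen res with
  | nil => simp [pvBexp_nil]
  | cons d t ih =>
    simp only [List.foldl_cons, List.filter_cons]
    cases hget : (PySem.Dict.mk d).get? key with
    | none =>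
      have hcont : (PySem.Dict.mk d).contains key = false := by
        rw [PySem.Dict.contains_eq_isSome_get?, hget]; rfl
      simp only [hcont, Bool.false_eq_true, if_false]
      exact ih pre seen res hseen
    | some v =>
      have hcont : (PySem.Dict.mk d).contains key = true := by
        rw [PySem.Dict.contains_eq_isSome_get?, hget]; rfl
      simp only [hcont, if_true]
      rw [pvBexp_cons]
      have hall : (pre.all (fun e => (PySem.Dict.mk e).get? key != (PySem.Dict.mk d).get? key))
          = !(PySem.Set.contains seen v) := by
        cases hsv : PySem.Set.contains seen v with
        | true =>
          obtain ⟨e, he, hev⟩ := (hseen v).mp hsv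
          simp only [Bool.not_true]
          rw [List.all_eq_false]
          exact ⟨e, he, by simp [hev, hget]⟩
        | false =>
          simp only [Bool.not_false]
          rw [List.all_eq_true]
          intro e he
          simp only [hget, bne_iff_ne, ne_eq]
          intro hev
          have : PySem.Set.contains seen v = true := (hseen v).mpr ⟨e, he, hev⟩
          rw [hsv] at this
          exact Bool.false_ne_true this
      by_cases hsv : PySem.Set.contains seen v = true
      · rw [if_pos hsv, hall, hsv, Bool.not_true, if_neg (by simp), List.nil_append]
        refine ih (pre ++ [d]) seen res ?_
        intro w
        rw [hseen w]
        constructor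
        · rintro ⟨e, he, hev⟩; exact ⟨e, by simp [he], hev⟩
        · rintro ⟨e, he, hev⟩
          rcases (List.mem_append.mp he) with h | h
          · exact ⟨e, h, hev⟩
          · simp only [List.mem_singleton] at h
            subst h
            rw [hget] at hev
            obtain rfl : v = w := Option.some.inj hev
            exact (hseen v).mp hsv
      · rw [if_neg hsv, hall]
        rw [show PySem.Set.contains seen v = false from by
          cases h : PySem.Set.contains seen v
          · rfl
          · exact absurd h hsv]
        rw [Bool.not_false, if_pos rfl]
        have hinv : ∀ w : String, PySem.Set.contains (PySem.Set.add seen v) w = true ↔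
            ∃ e ∈ pre ++ [d], (PySem.Dict.mk e).get? key = some w := by
          intro w
          rw [PySem.Set.contains_iff _ _, PySem.Set.mem_add]
          constructor
          · rintro (h | rfl)
            · obtain ⟨e, he, hev⟩ := (hseen w).mp ((PySem.Set.contains_iff _ _).mpr h)
              exact ⟨e, by simp [he], hev⟩
            · exact ⟨d, by simp, hget⟩
          · rintro ⟨e, he, hev⟩
            rcases (List.mem_append.mp he) with h | h
            · exact Or.inl ((PySem.Set.contains_iff _ _).mp ((hseen w).mpr ⟨e, h, hev⟩))
            · simp only [List.mem_singleton] at h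
              subst h
              rw [hget] at hev
              exact Or.inr (Option.some.inj hev).symm
        rw [ih (pre ++ [d]) (PySem.Set.add seen v) (res ++ [d]) hinv, List.append_assoc,
          List.singleton_append]

-- ===== VERDICT (by name: the statement is the Claim_ definition above) =====
theorem deduplicate_dict_list_spec : Claim_equal_deduplicate_dict_list := by
  intro dict_list key _
  unfold Spec_deduplicate_dict_list deduplicate_dict_list deduplicate_dict_list_alt
  have h := dedup_main key dict_list [] PySem.Set.empty []
    (by intro v; simp [PySem.Set.contains, PySem.Set.empty])
  rw [h]
  simp [pvBexp]
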